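-- pv_equiv track=rewrite | github.com/MorS1337/vychmash | idz1/fibonacci.py | fib_decode
-- ===== SOURCE A (Python) =====
-- def fib_decode(bits: str, i: int = 0):
--     # читаем биты F2, F3, ... слева направо; при встрече подряд '11' второй '1' — терминатор
--     F = [1, 2]
--     val = 0
--     prev_one = False
--     idx = 0  # 0 -> F2, 1 -> F3, ...
--     L = len(bits)
--     while i < L:
--         b = bits[i]; i += 1
--         if b == '1':
--             if prev_one:
--                 # встретили '11' -> это стоп-бит, НЕ добавляем значение текущего F[idx]
--                 return val, i
--             # обеспечиваем наличие F[idx]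
--             while idx >= len(F):
--                 F.append(F[-1] + F[-2])
--             val += F[idx]
--             prev_one = True
--         else:
--             prev_one = False
--         idx += 1
--     raise ValueError("truncated Fibonacci code")
-- ===== SOURCE B (Python) =====
-- def fib_decode(bits: str, i: int = 0):
--     # pass 1: locate the terminator = second bit of the first adjacent '11' pair
--     L = len(bits)
--     stop = None
--     for p in range(i + 1, L):
--         if bits[p - 1] == '1' and bits[p] == '1':
--             stop = p
--             break
--     if stop is None:
--         raise ValueError("truncated Fibonacci code")
--     # pass 2: build the Fibonacci weight table, then sum the weights of the '1' bits
--     F = [1, 2]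
--     for _ in range(stop - i - 1):
--         F.append(F[-1] + F[-2])
--     return sum(F[p - i] for p in range(i, stop) if bits[p] == '1'), stop + 1
-- ===== Notes on version B (the rewrite author's own statement) =====
-- stated objective: alternative
-- what changed: B makes three separate passes over the index range A scans: it first locates the terminator (the second bit of the first adjacent '11' pair) with a dedicated search loop, then builds the whole Fibonacci weight table in one counted loop, then sums the weights of the '1' positions, replacing A's single-pass character state machine with its prev_one flag and on-demand table growth.
import Mathlib
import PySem

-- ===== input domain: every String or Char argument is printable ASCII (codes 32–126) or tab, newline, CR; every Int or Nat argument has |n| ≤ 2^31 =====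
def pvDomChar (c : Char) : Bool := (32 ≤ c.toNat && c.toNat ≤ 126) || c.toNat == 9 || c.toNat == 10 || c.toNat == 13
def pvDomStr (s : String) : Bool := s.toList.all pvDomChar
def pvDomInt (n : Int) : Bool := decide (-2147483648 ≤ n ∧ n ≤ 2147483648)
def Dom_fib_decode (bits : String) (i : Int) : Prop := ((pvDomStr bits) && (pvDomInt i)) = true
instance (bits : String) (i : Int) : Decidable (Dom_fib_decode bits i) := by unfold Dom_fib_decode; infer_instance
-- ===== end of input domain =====

-- B finds the '11' terminator with a dedicated search pass, then builds the Fibonacci table once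
-- and sums weights of '1' positions in a separate pass (alternative decomposition of A's state machine).


-- ===== PORT A =====
-- inner while: while idx >= len(F): F.append(F[-1] + F[-2])
def fibExtendA (F : List Int) (idx : Int) : List Int :=
  if (F.length : Int) ≤ idx then
    fibExtendA (F ++ [PySem.List.pyGetD F (-1) 0 + PySem.List.pyGetD F (-2) 0]) idx
  else F
termination_by (idx + 1 - F.length).toNat
decreasing_by simp only [List.length_append, List.length_cons, List.length_nil]; omega

-- the main while loop; fuel = number of remaining iterations (L - i); none = the Python raises
def fibLoopA (s : List Char) (L : Int) (F : List Int) (val : Int) (prevOne : Bool)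
    (idx : Int) (i : Int) : Nat → Option (Int × Int)
  | 0 => none  -- i ≥ L: loop exits, ValueError
  | fuel + 1 =>
    if i < L then
      match PySem.List.pyGet? s i with
      | none => none  -- IndexError (i < -len)
      | some b =>
        if b = '1' then
          if prevOne then some (val, i + 1)
          else
            fibLoopA s L (fibExtendA F idx)
              (val + PySem.List.pyGetD (fibExtendA F idx) idx 0) true (idx + 1) (i + 1) fuel
        else fibLoopA s L F val false (idx + 1) (i + 1) fuel
    else none  -- ValueError "truncated Fibonacci code"

def fib_decode (bits : String) (i : Int) : Int × Int :=
  let L := PySem.Str.len bits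
  (fibLoopA bits.toList L [1, 2] 0 false 0 i (L - i).toNat).getD (0, 0)

-- ===== PORT B =====
-- pass 1: for p in range(i + 1, L): if bits[p-1] == '1' and bits[p] == '1': stop = p; break
-- fuel = number of remaining loop iterations; none = the loop finishes without a break
def findPairB (s : List Char) (p : Int) : Nat → Option Int
  | 0 => none
  | f + 1 =>
    if PySem.List.pyGet? s (p - 1) = some '1' ∧ PySem.List.pyGet? s p = some '1' then some p
    else findPairB s (p + 1) f

-- pass 2: for _ in range(stop - i - 1): F.append(F[-1] + F[-2])
def fibBuildB (F : List Int) : Nat → List Int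
  | 0 => F
  | k + 1 => fibBuildB (F ++ [PySem.List.pyGetD F (-1) 0 + PySem.List.pyGetD F (-2) 0]) k

def fib_decode_alt (bits : String) (i : Int) : Int × Int :=
  let L := PySem.Str.len bits
  match findPairB bits.toList (i + 1) ((L - (i + 1)).toNat) with
  | none => (0, 0)  -- Python raises ValueError here; excluded by Pre_
  | some stop =>
    let F := fibBuildB [1, 2] (stop - i - 1).toNat
    ((PySem.List.pyRange i stop).foldl
      (fun acc p => if PySem.List.pyGet? bits.toList p = some '1'
                    then acc + PySem.List.pyGetD F (p - i) 0 else acc) 0,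
     stop + 1)

-- ===== PRECONDITION & SPEC =====
-- Pre_ excludes exactly the inputs on which A raises: i < -len(bits) (IndexError on the first
-- bits[i]) and inputs whose scanned index sequence (bits[i:], continued from the string's start
-- when i is negative, by Python's negative indexing) has no adjacent '11' terminator (ValueError).
def Pre_fib_decode (bits : String) (i : Int) : Prop :=
  -(bits.toList.length : Int) ≤ i ∧
  PySem.Chars.isIn ['1', '1']
    (PySem.List.slice bits.toList (some i) none ++ (if i < 0 then bits.toList else [])) = true
instance (bits : String) (i : Int) : Decidable (Pre_fib_decode bits i) := by
  unfold Pre_fib_decode; infer_instance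
def pvWitness_fib_decode : String × Int := ("0101011", 0)

def Spec_fib_decode (bits : String) (i : Int) (out : Int × Int) : Prop := out = fib_decode_alt bits i
instance (bits : String) (i : Int) (out : Int × Int) : Decidable (Spec_fib_decode bits i out) := by
  unfold Spec_fib_decode; infer_instance

-- ===== CLAIM (what is proved, stated in full; the proofs are below) =====
def Claim_equal_fib_decode : Prop := ∀ (bits : String) (i : Int), Dom_fib_decode bits i → Pre_fib_decode bits i → Spec_fib_decode bits i (fib_decode bits i)

-- ===== LEMMAS AND PROOFS =====

-- Fibonacci weights: F[0] = 1, F[1] = 2, F[k+2] = F[k] + F[k+1]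
def fibv : Nat → Int
  | 0 => 1
  | 1 => 2
  | k + 2 => fibv k + fibv (k + 1)

def fibPref (m : Nat) : List Int := (List.range m).map fibv

-- first j with s[j] = s[j+1] = '1'
def find11 : List Char → Option Nat
  | c1 :: c2 :: rest => if c1 = '1' ∧ c2 = '1' then some 0 else (find11 (c2 :: rest)).map (· + 1)
  | _ => none

-- sum of fibv (idx+k) over k < cnt with s[n+k] = '1'
def tailSum (s : List Char) (n idx cnt : Nat) : Int :=
  match cnt with
  | 0 => 0
  | c + 1 => (if s[n]? = some '1' then fibv idx else 0) + tailSum s (n + 1) (idx + 1) c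

lemma fibPref_append (m : Nat) (h : 2 ≤ m) :
    fibPref m ++ [PySem.List.pyGetD (fibPref m) (-1) 0 + PySem.List.pyGetD (fibPref m) (-2) 0]
      = fibPref (m + 1) := by
  obtain ⟨k, rfl⟩ : ∃ k, m = k + 2 := ⟨m - 2, by omega⟩
  have hlen : (fibPref (k + 2)).length = k + 2 := by simp [fibPref]
  rw [PySem.List.pyGetD_neg_ofNat _ 1 0 (by omega) (by omega),
      PySem.List.pyGetD_neg_ofNat _ 2 0 (by omega) (by omega)]
  simp only [hlen]
  have h1 : (fibPref (k + 2))[k + 2 - 1] = fibv (k + 1) := by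
    simp [fibPref]
  have h2 : (fibPref (k + 2))[k + 2 - 2] = fibv k := by
    simp [fibPref]
  rw [h1, h2]
  have : fibPref (k + 2 + 1) = fibPref (k + 2) ++ [fibv (k + 2)] := by
    simp [fibPref, List.range_succ]
  rw [this]
  have : fibv (k + 2) = fibv k + fibv (k + 1) := rfl
  rw [this, Int.add_comm (fibv (k + 1))]

lemma fibExtendA_pref (k : Nat) : ∀ (m : Nat) (idx : Int), 2 ≤ m → k = (idx + 1 - m).toNat →
    ∃ m' : Nat, 2 ≤ m' ∧ idx < (m' : Int) ∧ fibExtendA (fibPref m) idx = fibPref m' := by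
  induction k with
  | zero =>
    intro m idx hm hk
    refine ⟨m, hm, by omega, ?_⟩
    rw [fibExtendA, if_neg (by simp [fibPref]; omega)]
  | succ k ih =>
    intro m idx hm hk
    by_cases h : ((fibPref m).length : Int) ≤ idx
    · rw [fibExtendA, if_pos h, fibPref_append m hm]
      have hlen : (fibPref m).length = m := by simp [fibPref]
      rw [hlen] at h
      exact ih (m + 1) idx (by omega) (by push_cast; omega)
    · refine ⟨m, hm, ?_, ?_⟩
      · simp [fibPref] at h; omega
      · rw [fibExtendA, if_neg h]

lemma fibBuildB_pref (k : Nat) : ∀ (m : Nat), 2 ≤ m → fibBuildB (fibPref m) k = fibPref (m + k) := by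
  induction k with
  | zero => intro m hm; simp [fibBuildB]
  | succ k ih =>
    intro m hm
    rw [fibBuildB, fibPref_append m hm, ih (m + 1) (by omega)]
    congr 1; omega

lemma fibPref_getD (m j : Nat) (h : j < m) : (fibPref m).getD j 0 = fibv j := by
  rw [List.getD_eq_getElem _ _ (by simp [fibPref]; omega)]
  simp [fibPref]

lemma tailSum_succ_right (s : List Char) : ∀ (cnt n idx : Nat),
    tailSum s n idx (cnt + 1) = tailSum s n idx cnt + (if s[n + cnt]? = some '1' then fibv (idx + cnt) else 0) := by
  intro cnt
  induction cnt with
  | zero => intro n idx; simp [tailSum]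
  | succ c ih =>
    intro n idx
    show _ + tailSum s (n + 1) (idx + 1) (c + 1) = (_ + tailSum s (n + 1) (idx + 1) c) + _
    rw [ih (n + 1) (idx + 1)]
    have e1 : n + 1 + c = n + (c + 1) := by omega
    have e2 : idx + 1 + c = idx + (c + 1) := by omega
    rw [e1, e2, Int.add_assoc]

-- prefix ['1','1'] characterization
lemma prefix11_cons2 (c1 c2 : Char) (rest : List Char) :
    (['1', '1'] <+: (c1 :: c2 :: rest)) ↔ (c1 = '1' ∧ c2 = '1') := by
  constructor
  · rintro ⟨t, ht⟩
    simp only [List.cons_append, List.nil_append, List.cons.injEq] at ht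
    exact ⟨ht.1.symm, ht.2.1.symm⟩
  · rintro ⟨rfl, rfl⟩; exact ⟨rest, rfl⟩

lemma find11_short (l : List Char) (h : l.length ≤ 1) : find11 l = none := by
  match l with
  | [] => rfl
  | [c] => rfl
  | c1 :: c2 :: rest => simp at h

lemma find11_none_iff (l : List Char) :
    find11 l = none ↔ ∀ j, ¬ (['1', '1'] <+: l.drop j) := by
  induction l with
  | nil => simp [find11]
  | cons c1 tl ih =>
    cases tl with
    | nil =>
      simp only [find11, true_iff]
      intro j
      cases j with
      | zero =>
        rw [List.drop_zero]
        rintro ⟨t, ht⟩; simp at ht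
      | succ j => simp
    | cons c2 rest =>
      rw [find11]
      constructor
      · intro h j
        have hc : ¬ (c1 = '1' ∧ c2 = '1') := by
          intro hc; rw [if_pos hc] at h; simp at h
        rw [if_neg hc] at h
        have h2 : find11 (c2 :: rest) = none := by
          cases hfe : find11 (c2 :: rest) with
          | none => rfl
          | some v => rw [hfe] at h; simp at h
        cases j with
        | zero => rw [List.drop_zero, prefix11_cons2]; exact hc
        | succ j => simpa using (ih.mp h2) j
      · intro h
        have hc : ¬ (c1 = '1' ∧ c2 = '1') := by
          have h0 := h 0
          rw [List.drop_zero, prefix11_cons2] at h0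
          exact h0
        rw [if_neg hc, Option.map_eq_none_iff]
        exact ih.mpr (fun j => by simpa using h (j + 1))

lemma find11_some_spec (l : List Char) (j : Nat) (h : find11 l = some j) :
    (['1', '1'] <+: l.drop j) ∧ ∀ k < j, ¬ (['1', '1'] <+: l.drop k) := by
  induction l generalizing j with
  | nil => simp [find11] at h
  | cons c1 tl ih =>
    cases tl with
    | nil => simp [find11] at h
    | cons c2 rest =>
      rw [find11] at h
      by_cases hc : c1 = '1' ∧ c2 = '1'
      · rw [if_pos hc] at h
        obtain rfl : j = 0 := by cases h; rfl
        exact ⟨(prefix11_cons2 _ _ _).mpr hc, by omega⟩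
      · rw [if_neg hc] at h
        obtain ⟨j', hj', rfl⟩ : ∃ j', find11 (c2 :: rest) = some j' ∧ j = j' + 1 := by
          cases hfe : find11 (c2 :: rest) with
          | none => rw [hfe] at h; simp at h
          | some v => rw [hfe] at h; cases h; exact ⟨v, rfl, rfl⟩
        obtain ⟨hp, hmin⟩ := ih _ hj'
        refine ⟨by simpa using hp, ?_⟩
        intro k hk
        cases k with
        | zero => rw [List.drop_zero, prefix11_cons2]; exact hc
        | succ k => simpa using hmin k (by omega)

-- characterization of A's while loop
lemma loopA_char (s : List Char) : ∀ (fuel n : Nat) (val : Int) (prev : Bool) (idx m : Nat),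
    2 ≤ m → fuel = s.length - n →
    fibLoopA s (s.length : Int) (fibPref m) val prev (idx : Int) (n : Int) fuel =
      if prev = true ∧ s[n]? = some '1' then some (val, (n : Int) + 1)
      else (find11 (s.drop n)).map
        (fun j => (val + tailSum s n idx (j + 1), ((n + j : Nat) : Int) + 2)) := by
  intro fuel
  induction fuel with
  | zero =>
    intro n val prev idx m hm hf
    have hn : s.length ≤ n := by omega
    have h1 : s[n]? = none := List.getElem?_eq_none hn
    have h2 : s.drop n = [] := List.drop_eq_nil_of_le hn
    rw [fibLoopA, h1, h2]
    simp [find11]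
  | succ fuel ih =>
    intro n val prev idx m hm hf
    have hn : n < s.length := by omega
    have hgete : s[n]? = some s[n] := List.getElem?_eq_getElem hn
    have hget : PySem.List.pyGet? s (n : Int) = some s[n] := by
      rw [PySem.List.pyGet?_natCast, hgete]
    have hdrop : s.drop n = s[n] :: s.drop (n + 1) := List.drop_eq_getElem_cons hn
    have hcast1 : ((n : Int) + 1) = ((n + 1 : Nat) : Int) := by push_cast; ring
    rw [fibLoopA, if_pos (by exact_mod_cast hn), hget]
    dsimp only
    by_cases hb : s[n] = '1'
    · rw [if_pos hb]
      cases prev with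
      | true =>
        rw [if_pos rfl, if_pos ⟨rfl, by rw [hgete, hb]⟩]
      | false =>
        rw [if_neg (by simp)]
        obtain ⟨m', hm', hidx, hF'⟩ :=
          fibExtendA_pref (((idx : Int) + 1 - (m : Int)).toNat) m (idx : Int) hm rfl
        simp only [hF']
        have hval : PySem.List.pyGetD (fibPref m') (idx : Int) 0 = fibv idx := by
          rw [PySem.List.pyGetD_natCast, fibPref_getD m' idx (by exact_mod_cast hidx)]
        rw [hval]
        have hcast2 : ((idx : Int) + 1) = ((idx + 1 : Nat) : Int) := by push_cast; ring
        rw [hcast1, hcast2, ih (n + 1) (val + fibv idx) true (idx + 1) m' hm' (by omega)]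
        conv_rhs => rw [if_neg (show ¬ (false = true ∧ s[n]? = some '1') by simp)]
        rw [hdrop, hb]
        cases hd : s.drop (n + 1) with
        | nil =>
          have h1 : s[n + 1]? = none := List.getElem?_eq_none (by
            have := List.drop_eq_nil_iff.mp hd; omega)
          rw [h1]
          simp [find11]
        | cons c2 rest =>
          have h2 : s[n + 1]? = some c2 := by
            have := @List.getElem?_drop _ s (n + 1) 0
            rw [hd] at this
            simpa using this.symm
          by_cases hc2 : c2 = '1'
          · rw [h2, hc2, if_pos ⟨rfl, rfl⟩]
            rw [find11, if_pos ⟨rfl, rfl⟩]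
            have ht1 : tailSum s n idx 1 = fibv idx := by
              rw [tailSum, tailSum, hgete, hb, if_pos rfl]
              ring
            rw [Option.map_some, ht1]
            have : ((n + 0 : Nat) : Int) + 2 = ((n + 1 : Nat) : Int) + 1 := by push_cast; ring
            rw [this]
          · rw [h2, if_neg (by simp [hc2]), find11, if_neg (by simp [hc2])]
            cases hff : find11 (c2 :: rest) with
            | none => simp
            | some j =>
              simp only [Option.map_some]
              have ht : tailSum s n idx (j + 1 + 1)
                  = fibv idx + tailSum s (n + 1) (idx + 1) (j + 1) := by
                rw [tailSum, hgete, hb, if_pos rfl]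
              rw [ht]
              have : ((n + (j + 1) : Nat) : Int) + 2 = ((n + 1 + j : Nat) : Int) + 2 := by
                push_cast; ring
              rw [this, Int.add_assoc]
    · have hcast2 : ((idx : Int) + 1) = ((idx + 1 : Nat) : Int) := by push_cast; ring
      rw [if_neg hb, hcast1, hcast2, ih (n + 1) val false (idx + 1) m hm (by omega)]
      have hcond : ¬ (prev = true ∧ s[n]? = some '1') := by
        rintro ⟨-, hsn⟩
        rw [hgete] at hsn
        exact hb (Option.some.inj hsn)
      conv_rhs => rw [if_neg hcond]
      rw [if_neg (show ¬ (false = true ∧ s[n + 1]? = some '1') by simp), hdrop]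
      cases hd : s.drop (n + 1) with
      | nil => simp [find11]
      | cons c2 rest =>
        rw [find11, if_neg (by rintro ⟨h1, -⟩; exact hb h1)]
        cases hff : find11 (c2 :: rest) with
        | none => simp
        | some j =>
          simp only [Option.map_some]
          have ht : tailSum s n idx (j + 1 + 1)
              = tailSum s (n + 1) (idx + 1) (j + 1) := by
            rw [tailSum, hgete, if_neg (by simp [hb]), Int.zero_add]
          rw [ht]
          have : ((n + (j + 1) : Nat) : Int) + 2 = ((n + 1 + j : Nat) : Int) + 2 := by
            push_cast; ring
          rw [this]

-- shifting A's loop to the scan list t (t[k] = bits[off+k]); the returned index is off + the t-index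
lemma loopA_shift (s t : List Char) (off : Int)
    (ht : ∀ k : Nat, t[k]? = PySem.List.pyGet? s (off + (k : Int)))
    (hlen : (t.length : Int) = (s.length : Int) - off) :
    ∀ (fuel k : Nat) (F : List Int) (val : Int) (prev : Bool) (idx : Int),
      fibLoopA s (s.length : Int) F val prev idx (off + (k : Int)) fuel
        = (fibLoopA t (t.length : Int) F val prev idx (k : Int) fuel).map
            (fun r => (r.1, off + r.2)) := by
  intro fuel
  induction fuel with
  | zero => intro k F val prev idx; rfl
  | succ fuel ih =>
    intro k F val prev idx
    rw [fibLoopA, fibLoopA]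
    by_cases hk : (k : Int) < (t.length : Int)
    · rw [if_pos (by omega), if_pos hk]
      have hkn : k < t.length := by exact_mod_cast hk
      have h1 : PySem.List.pyGet? t (k : Int) = some t[k] := by
        rw [PySem.List.pyGet?_natCast, List.getElem?_eq_getElem hkn]
      have h2 : PySem.List.pyGet? s (off + (k : Int)) = some t[k] := by
        rw [← ht k, List.getElem?_eq_getElem hkn]
      rw [h1, h2]
      dsimp only
      have hc1 : off + (k : Int) + 1 = off + ((k + 1 : Nat) : Int) := by push_cast; ring
      have hc2 : ((k : Int) + 1) = ((k + 1 : Nat) : Int) := by push_cast; ring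
      by_cases hb : t[k] = '1'
      · rw [if_pos hb, if_pos hb]
        cases prev with
        | true =>
          rw [if_pos rfl, if_pos rfl]
          simp only [Option.map_some]
          rw [Int.add_assoc]
        | false =>
          rw [if_neg (by simp), if_neg (by simp), hc1, hc2]
          exact ih (k + 1) (fibExtendA F idx) _ true (idx + 1)
      · rw [if_neg hb, if_neg hb, hc1, hc2]
        exact ih (k + 1) F val false (idx + 1)
    · rw [if_neg (by omega), if_neg hk]
      rfl

-- B's terminator search, expressed through find11 on the scan list t
lemma findPairB_eq (s t : List Char) (i : Int)
    (ht : ∀ k : Nat, t[k]? = PySem.List.pyGet? s (i + (k : Int))) :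
    ∀ (fuel k : Nat), 1 ≤ k → fuel = t.length - k →
      findPairB s (i + (k : Int)) fuel
        = (find11 (t.drop (k - 1))).map (fun j => i + ((k - 1 + j : Nat) : Int) + 1) := by
  intro fuel
  induction fuel with
  | zero =>
    intro k hk hf
    have hsh : (t.drop (k - 1)).length ≤ 1 := by
      simp only [List.length_drop]; omega
    rw [findPairB, find11_short _ hsh]
    rfl
  | succ f ih =>
    intro k hk hf
    have hklen : k < t.length := by omega
    have hk1 : k - 1 < t.length := by omega
    have e1 : t[k - 1]? = PySem.List.pyGet? s (i + (k : Int) - 1) := by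
      rw [ht (k - 1)]
      congr 1
      push_cast [Nat.cast_sub hk]
      ring
    have hgk1 : t[k - 1]? = some t[k - 1] := List.getElem?_eq_getElem hk1
    have hgk : t[k]? = some t[k] := List.getElem?_eq_getElem hklen
    have hdrop : t.drop (k - 1) = t[k - 1] :: t[k] :: t.drop (k + 1) := by
      rw [List.drop_eq_getElem_cons hk1]
      congr 1
      · have : k - 1 + 1 = k := by omega
        rw [this, List.drop_eq_getElem_cons hklen]
    rw [findPairB, ← e1, ← ht k, hgk1, hgk, hdrop, find11]
    by_cases hc : t[k - 1] = '1' ∧ t[k] = '1'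
    · rw [if_pos (by exact ⟨by rw [hc.1], by rw [hc.2]⟩), if_pos hc]
      simp only [Option.map_some, Option.some.injEq]
      push_cast [Nat.cast_sub hk]
      ring
    · have hc' : ¬ (some t[k - 1] = some '1' ∧ some t[k] = some '1') := by
        rintro ⟨ha, hb⟩
        exact hc ⟨Option.some.inj ha, Option.some.inj hb⟩
      rw [if_neg hc', if_neg hc]
      have hcast : i + (k : Int) + 1 = i + ((k + 1 : Nat) : Int) := by push_cast; ring
      rw [hcast, ih (k + 1) (by omega) (by omega)]
      have : (k + 1) - 1 = k := by omega
      rw [this]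
      have hdk : t.drop k = t[k] :: t.drop (k + 1) := List.drop_eq_getElem_cons hklen
      rw [← hdk]
      cases hff : find11 (t.drop k) with
      | none => rfl
      | some j =>
        simp only [Option.map_some, Option.some.injEq]
        have : (k - 1) + (j + 1) = k + j := by omega
        rw [this]

-- B's summation pass: positions p = i .. i+cnt-1, weight index p - i, read through the scan list t
lemma B_sum_t (s t : List Char) (i : Int)
    (ht : ∀ k : Nat, t[k]? = PySem.List.pyGet? s (i + (k : Int))) (mF : Nat) :
    ∀ (cnt : Nat), cnt ≤ mF → ∀ acc : Int,
      (PySem.List.pyRange i (i + (cnt : Int))).foldl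
        (fun acc p => if PySem.List.pyGet? s p = some '1'
                      then acc + PySem.List.pyGetD (fibPref mF) (p - i) 0 else acc) acc
      = acc + tailSum t 0 0 cnt := by
  intro cnt
  induction cnt with
  | zero =>
    intro _ acc
    simp [PySem.List.pyRange, tailSum]
  | succ c ihc =>
    intro hc acc
    have h1 : i + ((c + 1 : Nat) : Int) = (i + (c : Nat)) + 1 := by push_cast; ring
    rw [h1, PySem.List.pyRange_one_succ_right (by omega), List.foldl_append, ihc (by omega) acc]
    simp only [List.foldl_cons, List.foldl_nil]
    have h3 : i + ((c : Nat) : Int) - i = ((c : Nat) : Int) := by ring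
    rw [← ht c, h3, PySem.List.pyGetD_natCast, fibPref_getD mF c (by omega),
        tailSum_succ_right t c 0 0]
    simp only [Nat.zero_add]
    by_cases hcond : t[c]? = some '1'
    · rw [if_pos hcond, if_pos hcond]
      ring
    · rw [if_neg hcond, if_neg hcond]
      ring

-- the scan list t: t[k] is what A's loop reads at step k, and len t = len s - i
lemma tail_facts (s : List Char) (i : Int) (t : List Char)
    (htd : t = PySem.List.slice s (some i) none ++ (if i < 0 then s else []))
    (hge : -(s.length : Int) ≤ i) (hle : i ≤ (s.length : Int)) :
    (t.length : Int) = (s.length : Int) - i ∧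
      ∀ k : Nat, t[k]? = PySem.List.pyGet? s (i + (k : Int)) := by
  by_cases hi : 0 ≤ i
  · subst htd
    rw [PySem.List.slice_from s hi, if_neg (by omega), List.append_nil]
    refine ⟨by simp [List.length_drop]; omega, ?_⟩
    intro k
    rw [List.getElem?_drop, PySem.List.pyGet?_of_nonneg s (by omega)]
    congr 1
    omega
  · rw [Int.not_le] at hi
    subst htd
    have hsl : PySem.List.slice s (some i) none = s.drop ((s.length : Int) + i).toNat := by
      rw [PySem.List.slice_some_none]
      congr 1
      simp only [PySem.List.clampIdx, if_pos hi, if_neg (show ¬ ((s.length : Int) + i < 0) by omega)]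
    rw [hsl, if_pos hi]
    have hd : (s.drop ((s.length : Int) + i).toNat).length = (-i).toNat := by
      simp [List.length_drop]
      omega
    refine ⟨by simp [List.length_drop]; omega, ?_⟩
    intro k
    rw [List.getElem?_append]
    by_cases hk : k < (s.drop ((s.length : Int) + i).toNat).length
    · rw [if_pos hk, List.getElem?_drop,
          PySem.List.pyGet?_neg s (show i + (k : Int) < 0 by omega) (by omega)]
      congr 1
      omega
    · rw [if_neg hk, PySem.List.pyGet?_of_nonneg s (show (0 : Int) ≤ i + (k : Int) by omega)]
      congr 1
      omega

-- ===== VERDICT (by name: the statement is the Claim_ definition above) =====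
theorem fib_decode_spec : Claim_equal_fib_decode := by
  intro bits i _ hPre
  obtain ⟨hge, hisin⟩ := hPre
  show fib_decode bits i = fib_decode_alt bits i
  dsimp only [fib_decode, fib_decode_alt]
  rw [PySem.Str.len_eq]
  set s := bits.toList with hs
  set t := PySem.List.slice s (some i) none ++ (if i < 0 then s else []) with htd
  have hle : i ≤ (s.length : Int) := by
    by_contra h
    have h0 : t = [] := by
      rw [htd, PySem.List.slice_from s (by omega), List.drop_eq_nil_of_le (by omega),
          if_neg (by omega), List.append_nil]
    rw [PySem.Chars.isIn_iff_infix, h0, List.infix_nil] at hisin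
    simp at hisin
  obtain ⟨hlen, ht⟩ := tail_facts s i t htd hge hle
  cases hf : find11 t with
  | none =>
    obtain ⟨j0, hj0⟩ := (PySem.Chars.exists_prefix_drop_iff_isIn ['1', '1'] t).mpr hisin
    exact absurd hj0 ((find11_none_iff t).mp hf j0)
  | some j =>
    -- the pair occupies t-positions j, j+1, so t has at least j+2 elements
    have htl : j + 2 ≤ t.length := by
      obtain ⟨r, hr⟩ := (find11_some_spec t j hf).1
      have : (t.drop j).length = t.length - j := List.length_drop
      rw [← hr] at this
      simp only [List.length_append, List.length_cons, List.length_nil] at this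
      omega
    -- B's search pass
    have hcast1 : i + 1 = i + ((1 : Nat) : Int) := by push_cast; ring
    have hB1 : findPairB s (i + 1) (((s.length : Int) - (i + 1)).toNat)
        = some (i + (j : Int) + 1) := by
      rw [hcast1, findPairB_eq s t i ht _ 1 (le_refl 1) (by omega)]
      simp only [Nat.sub_self, List.drop_zero, hf, Option.map_some, Nat.zero_add]
    rw [hB1]
    dsimp only
    -- B's weight table
    have h12 : ([1, 2] : List Int) = fibPref 2 := by decide
    have hF : fibBuildB [1, 2] ((i + (j : Int) + 1 - i - 1).toNat) = fibPref (2 + j) := by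
      rw [h12, fibBuildB_pref _ 2 (le_refl 2)]
      congr 1
      omega
    rw [hF]
    -- A's loop, shifted to the scan list t
    have hfuel : (((s.length : Int)) - i).toNat = t.length := by omega
    rw [hfuel]
    have hsh := loopA_shift s t i ht hlen t.length 0 [1, 2] 0 false 0
    simp only [Nat.cast_zero, add_zero] at hsh
    rw [hsh, h12]
    have hL := loopA_char t t.length 0 0 false 0 2 (le_refl 2) (by omega)
    simp only [Nat.cast_zero] at hL
    rw [hL, if_neg (show ¬ (false = true ∧ t[0]? = some '1') by simp), List.drop_zero, hf]
    simp only [Option.map_some, Option.getD_some, Nat.zero_add]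
    -- B's summation pass
    have hsum : i + (j : Int) + 1 = i + ((j + 1 : Nat) : Int) := by push_cast; ring
    rw [hsum, B_sum_t s t i ht (2 + j) (j + 1) (by omega) 0]
    refine Prod.ext rfl ?_
    show i + (((j : Nat) : Int) + 2) = i + ((j + 1 : Nat) : Int) + 1
    push_cast
    ring
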